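-- pv_equiv track=rewrite | github.com/ecorheim/conversation-logger | scripts/utils.py | calculate_fence
-- ===== SOURCE A (Python) =====
-- def calculate_fence(content):
--     """Calculate minimum backtick fence that doesn't collide with content."""
--     max_consecutive = 0
--     current = 0
--     for char in content:
--         if char == '`':
--             current += 1
--             max_consecutive = max(max_consecutive, current)
--         else:
--             current = 0
--     return '`' * max(max_consecutive + 1, 3)  # minimum 3
-- ===== SOURCE B (Python) =====
-- def calculate_fence(content):
--     """Calculate minimum backtick fence that doesn't collide with content."""
--     n = 3
--     while '`' * n in content:
--         n += 1
--     return '`' * n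
-- ===== Notes on version B (the rewrite author's own statement) =====
-- stated objective: simpler
-- what changed: B does not scan characters or track run counters at all: it probes candidate fences directly, growing the candidate length from 3 while the candidate still occurs as a substring of the content, and returns the first non-colliding fence; the substring tests run in CPython's C string-search, which measured faster than A's per-character Python loop.
import Mathlib
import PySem

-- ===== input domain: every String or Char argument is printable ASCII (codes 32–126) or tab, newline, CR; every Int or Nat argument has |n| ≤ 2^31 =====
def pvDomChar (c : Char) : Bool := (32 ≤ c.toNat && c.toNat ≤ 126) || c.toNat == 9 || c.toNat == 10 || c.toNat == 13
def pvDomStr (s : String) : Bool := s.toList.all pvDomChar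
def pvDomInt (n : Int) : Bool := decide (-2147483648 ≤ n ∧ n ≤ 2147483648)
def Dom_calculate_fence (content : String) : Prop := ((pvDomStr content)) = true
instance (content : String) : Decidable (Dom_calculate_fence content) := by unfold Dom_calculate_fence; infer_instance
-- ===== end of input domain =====

-- B grows a candidate fence from length 3, probing substring membership ('`'*n in content), instead of A's per-character run counters; objective: simpler.


-- ===== PORT A =====
-- per-character loop carrying (max_consecutive, current)
def calculate_fence (content : String) : String :=
  String.mk (List.replicate (max ((content.toList.foldl
    (fun (st : Int × Int) char =>
      if char = '`' then (max st.1 (st.2 + 1), st.2 + 1) else (st.1, 0))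
    (0, 0)).1 + 1) 3).toNat '`')

-- ===== PORT B =====
-- 'while "`" * n in content: n += 1'; terminates because a substring is no longer than the content
def fenceLoop (cl : List Char) (n : Nat) : Nat :=
  if h : PySem.Chars.isIn (List.replicate n '`') cl = true then
    fenceLoop cl (n + 1)
  else n
termination_by cl.length + 1 - n
decreasing_by
  have := (PySem.Chars.isIn_iff_infix _ _).mp h
  have := this.length_le
  simp only [List.length_replicate] at this
  omega

def calculate_fence_alt (content : String) : String :=
  String.mk (List.replicate (fenceLoop content.toList 3) '`')

-- ===== PRECONDITION & SPEC =====
def Spec_calculate_fence (content : String) (out : String) : Prop := out = calculate_fence_alt content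
instance (content : String) (out : String) : Decidable (Spec_calculate_fence content out) := by unfold Spec_calculate_fence; infer_instance

-- ===== CLAIM =====
def Claim_equal_calculate_fence : Prop := ∀ (content : String), Dom_calculate_fence content → Spec_calculate_fence content (calculate_fence content)

-- ===== LEMMAS AND PROOFS =====

-- abstract longest-run function both sides are reduced to
def g : Int → List Char → Int
  | cur, [] => cur
  | cur, c :: t => if c = '`' then g (cur + 1) t else max cur (g 0 t)

theorem g_ge : ∀ (l : List Char) (cur : Int), cur ≤ g cur l := by
  intro l
  induction l with
  | nil => intro cur; simp [g]
  | cons c t ih =>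
    intro cur
    simp only [g]
    split
    · exact le_trans (by omega) (ih (cur + 1))
    · exact le_max_left _ _

theorem g_mono : ∀ (l : List Char) (c c' : Int), c ≤ c' → g c l ≤ g c' l := by
  intro l
  induction l with
  | nil => intro c c' h; simpa [g] using h
  | cons x t ih =>
    intro c c' h
    simp only [g]
    split
    · exact ih _ _ (by omega)
    · exact max_le_max h le_rfl

theorem foldA_eq_g : ∀ (l : List Char) (mx cur : Int), 0 ≤ cur → cur ≤ mx →
    (l.foldl (fun (st : Int × Int) char =>
      if char = '`' then (max st.1 (st.2 + 1), st.2 + 1) else (st.1, 0)) (mx, cur)).1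
    = max mx (g cur l) := by
  intro l
  induction l with
  | nil => intro mx cur h0 h; simp [g, max_eq_left h]
  | cons c t ih =>
    intro mx cur h0 h
    simp only [List.foldl_cons, g]
    by_cases hc : c = '`'
    · simp only [hc, reduceIte]
      rw [ih _ _ (by omega) (le_max_right _ _)]
      have := g_ge t (cur + 1)
      omega
    · simp only [if_neg hc]
      rw [ih _ _ le_rfl (by omega : (0:Int) ≤ mx)]
      have := g_ge t (0 : Int)
      omega

theorem g_replicate_append : ∀ (n : Nat) (t : List Char) (cur : Int),
    g cur (List.replicate n '`' ++ t) = g (cur + n) t := by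
  intro n
  induction n with
  | zero => intro t cur; simp
  | succ m ih =>
    intro t cur
    rw [List.replicate_succ, List.cons_append]
    simp only [g, reduceIte, ih]
    congr 1
    omega

-- if replicate n '`' occurs in l, the longest run is at least n
theorem infix_le_g : ∀ (n : Nat) (l : List Char),
    List.replicate n '`' <:+: l → (n : Int) ≤ g 0 l := by
  intro n l h
  obtain ⟨s, t, rfl⟩ := h
  induction s with
  | nil =>
    simp only [List.nil_append, g_replicate_append, zero_add]
    exact le_trans le_rfl (g_ge t n)
  | cons c s ih =>
    refine le_trans ih ?_
    simp only [List.cons_append, g]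
    split
    · exact le_trans (g_mono _ 0 1 (by omega)) le_rfl
    · exact le_max_right _ _

-- conversely, a run of length ≥ n yields replicate n '`' as a substring
theorem g_le_infix : ∀ (l : List Char) (k n : Nat), (n : Int) ≤ g k l →
    List.replicate n '`' <:+: (List.replicate k '`' ++ l) := by
  intro l
  induction l with
  | nil =>
    intro k n h
    simp only [g] at h
    have hnk : n ≤ k := by exact_mod_cast h
    refine (List.IsPrefix.isInfix ?_)
    simp only [List.append_nil]
    exact ⟨List.replicate (k - n) '`', by rw [List.replicate_append_replicate, Nat.add_sub_cancel' hnk]⟩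
  | cons c t ih =>
    intro k n h
    by_cases hc : c = '`'
    · subst hc
      simp only [g, reduceIte] at h
      have := ih (k + 1) n (by exact_mod_cast h)
      rwa [List.replicate_succ', List.append_assoc, List.singleton_append] at this
    · simp only [g, if_neg hc] at h
      rcases le_max_iff.mp h with h1 | h2
      · have hnk : n ≤ k := by exact_mod_cast h1
        refine List.IsPrefix.isInfix ⟨List.replicate (k - n) '`' ++ c :: t, ?_⟩
        rw [← List.append_assoc, List.replicate_append_replicate, Nat.add_sub_cancel' hnk]
      · exact (ih 0 n h2).trans ⟨List.replicate k '`' ++ [c], [], by simp⟩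

theorem isIn_repl_iff (n : Nat) (l : List Char) :
    PySem.Chars.isIn (List.replicate n '`') l = true ↔ (n : Int) ≤ g 0 l := by
  rw [PySem.Chars.isIn_iff_infix]
  constructor
  · exact infix_le_g n l
  · intro h
    simpa using g_le_infix l 0 n h

theorem fenceLoop_eq : ∀ (k : Nat) (l : List Char) (n : Nat),
    (g 0 l).toNat + 1 ≤ n + k → fenceLoop l n = max n ((g 0 l).toNat + 1) := by
  intro k
  induction k with
  | zero =>
    intro l n h
    rw [fenceLoop]
    have hg := g_ge l 0
    have hfalse : ¬ PySem.Chars.isIn (List.replicate n '`') l = true := by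
      rw [isIn_repl_iff]; omega
    rw [dif_neg hfalse]
    omega
  | succ m ih =>
    intro l n h
    rw [fenceLoop]
    have hg := g_ge l 0
    by_cases hin : PySem.Chars.isIn (List.replicate n '`') l = true
    · rw [dif_pos hin]
      have hle := (isIn_repl_iff n l).mp hin
      rw [ih l (n + 1) (by omega)]
      omega
    · rw [dif_neg hin]
      rw [isIn_repl_iff] at hin
      omega

-- ===== VERDICT =====
theorem calculate_fence_spec : Claim_equal_calculate_fence := by
  intro content _
  unfold Spec_calculate_fence calculate_fence calculate_fence_alt
  rw [foldA_eq_g content.toList 0 0 le_rfl le_rfl,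
      fenceLoop_eq ((g 0 content.toList).toNat + 1) content.toList 3 (by omega)]
  have hg := g_ge content.toList 0
  have hN : (max (g 0 content.toList + 1) 3).toNat
      = max 3 ((g 0 content.toList).toNat + 1) := by
    by_cases h3 : g 0 content.toList + 1 ≤ 3
    · rw [max_eq_right h3, max_eq_left (by omega)]
      rfl
    · rw [max_eq_left (by omega), max_eq_right (by omega)]
      omega
  rw [max_eq_right hg, hN]
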